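-- pv_equiv track=rewrite | github.com/alexandraback/datacollection | solutions_5753053697277952_1/Python/rappel/A.py | maxind
-- ===== SOURCE A (Python) =====
-- def maxind(arr):
-- 	max=0
-- 	max_i=-1
-- 	for i in range(len(arr)):
-- 		if arr[i]>max:
-- 			max=arr[i]
-- 			max_i=i
-- 	return max_i
-- ===== SOURCE B (Python) =====
-- def maxind(arr):
--     pos = [x for x in arr if x > 0]
--     if not pos:
--         return -1
--     return arr.index(max(pos))
-- ===== Notes on version B (the rewrite author's own statement) =====
-- stated objective: idiomatic
-- what changed: Replaces A's single running-max/index loop with a filter-positives + max() + list.index() pipeline (first occurrence of the maximum).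
import Mathlib
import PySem

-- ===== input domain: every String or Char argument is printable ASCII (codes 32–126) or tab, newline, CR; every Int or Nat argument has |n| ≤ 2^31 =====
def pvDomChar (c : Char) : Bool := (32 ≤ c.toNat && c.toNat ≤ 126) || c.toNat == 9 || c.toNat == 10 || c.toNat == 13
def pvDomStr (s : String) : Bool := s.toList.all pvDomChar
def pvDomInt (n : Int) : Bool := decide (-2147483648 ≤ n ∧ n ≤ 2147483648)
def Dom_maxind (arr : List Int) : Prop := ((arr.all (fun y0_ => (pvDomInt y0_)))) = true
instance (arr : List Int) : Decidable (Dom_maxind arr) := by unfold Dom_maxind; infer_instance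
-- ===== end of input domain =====

-- B replaces A's running-max loop by the idiomatic filter-positives + max + first-index pipeline; same cost.

-- ===== PORT A =====
def maxind (arr : List Int) : Int :=
  ((PySem.List.pyRange 0 (arr.length : Int) 1).foldl
    (fun (s : Int × Int) i =>
      let v := PySem.List.pyGetD arr i 0   -- arr[i]; i ∈ range(len(arr)) so always in range
      if v > s.1 then (v, i) else s)
    (0, -1)).2

-- ===== PORT B =====
def maxind_alt (arr : List Int) : Int :=
  let pos := arr.filter (fun x => decide (0 < x))
  if pos = [] then -1
  else
    match PySem.List.max? pos (fun y => y) with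
    | some m =>
      match PySem.List.index? arr m with
      | some k => (k : Int)
      | none => -1   -- unreachable: m ∈ pos ⊆ arr
    | none => -1     -- unreachable: pos ≠ []

-- ===== PRECONDITION & SPEC =====
def Spec_maxind (arr : List Int) (out : Int) : Prop := out = maxind_alt arr
instance (arr : List Int) (out : Int) : Decidable (Spec_maxind arr out) := by unfold Spec_maxind; infer_instance

-- ===== CLAIM (what is proved, stated in full; the proofs are below) =====
def Claim_equal_maxind : Prop := ∀ (arr : List Int), Dom_maxind arr → Spec_maxind arr (maxind arr)

-- ===== LEMMAS AND PROOFS =====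

-- A's loop body, uncurried over (index, value) pairs
def pvStep (s : Int × Int) (p : Int × Int) : Int × Int :=
  if p.2 > s.1 then (p.2, p.1) else s

-- max of a nonempty list (0 on [], never used there)
def pvFmax : List Int → Int
  | [] => 0
  | x :: t => t.foldl max x

theorem pvFoldlMax_eq_self (l : List Int) (a : Int) (h : ∀ y ∈ l, y ≤ a) :
    l.foldl max a = a := by
  have h1 := (PySem.List.le_foldl_max l a).1
  rcases PySem.List.foldl_max_mem l a with h2 | h2
  · exact h2
  · exact le_antisymm (h _ h2) h1

theorem pvFoldlMax_eq_of (l : List Int) (a b : Int) (hb : b ∈ l) (hab : a ≤ b)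
    (hall : ∀ y ∈ l, y ≤ b) : l.foldl max a = b := by
  have h1 := (PySem.List.le_foldl_max l a).2 _ hb
  rcases PySem.List.foldl_max_mem l a with h2 | h2
  · omega
  · exact le_antisymm (hall _ h2) h1

theorem pvFmax_mem (l : List Int) (h : l ≠ []) : pvFmax l ∈ l := by
  cases l with
  | nil => simp at h
  | cons x t =>
    rcases PySem.List.foldl_max_mem t x with h2 | h2
    · simp [pvFmax, h2]
    · simp [pvFmax]; right; exact h2

theorem pvFmax_isMax (l : List Int) : ∀ y ∈ l, y ≤ pvFmax l := by
  cases l with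
  | nil => simp
  | cons x t =>
    intro y hy
    rcases List.mem_cons.mp hy with rfl | hy
    · exact (PySem.List.le_foldl_max t y).1
    · exact (PySem.List.le_foldl_max t x).2 _ hy

theorem pvIndex?_eq (l : List Int) (a : Int) (h : a ∈ l) :
    List.idxOf? a l = some (List.idxOf a l) := by
  induction l with
  | nil => simp at h
  | cons x t ih =>
    by_cases hx : x = a
    · subst hx; simp [List.idxOf?_cons]
    · rcases List.mem_cons.mp h with h1 | h1
      · omega
      · simp [List.idxOf?_cons, hx, ih h1]

-- characterisation of A's loop over any suffix, any start index and state
theorem pvKey (t : List Int) (i0 m mi : Int) :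
    (List.foldl pvStep (m, mi) (PySem.List.enumerate t i0)).2 =
      if (t.filter (fun x => decide (m < x))) = [] then mi
      else i0 + (List.idxOf (pvFmax (t.filter (fun x => decide (m < x)))) t : Int) := by
  induction t generalizing i0 m mi with
  | nil => simp [PySem.List.enumerate_nil]
  | cons x t ih =>
    rw [PySem.List.enumerate_cons, List.foldl_cons]
    by_cases hx : m < x
    · have hstep : pvStep (m, mi) (i0, x) = (x, i0) := by simp [pvStep, hx]
      rw [hstep, ih]
      have hfil : (x :: t).filter (fun y => decide (m < y)) =
          x :: t.filter (fun y => decide (m < y)) := by simp [hx]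
      by_cases h2 : t.filter (fun y => decide (x < y)) = []
      · -- all later elements ≤ x : the maximum is x, at index i0
        have hle : ∀ y ∈ t.filter (fun z => decide (m < z)), y ≤ x := by
          intro y hy
          have hyt : y ∈ t := List.mem_of_mem_filter hy
          by_contra hgt
          have : y ∈ t.filter (fun z => decide (x < z)) :=
            List.mem_filter.mpr ⟨hyt, by simp; omega⟩
          simp [h2] at this
        have hM : pvFmax (x :: t.filter (fun z => decide (m < z))) = x := by
          simp only [pvFmax]; exact pvFoldlMax_eq_self _ _ hle
        rw [if_pos h2, hfil, if_neg (List.cons_ne_nil _ _), hM, List.idxOf_cons_self]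
        simp
      · -- some later element exceeds x : maxima of the two filters agree
        set M := pvFmax (t.filter (fun z => decide (x < z))) with hMdef
        have hMmem := pvFmax_mem _ h2
        have hMt : M ∈ t := List.mem_of_mem_filter hMmem
        have hxM : x < M := by
          have := (List.mem_filter.mp hMmem).2; simpa using this
        have hMmax := pvFmax_isMax (t.filter (fun z => decide (x < z)))
        have hall : ∀ y ∈ t.filter (fun z => decide (m < z)), y ≤ M := by
          intro y hy
          have hyt : y ∈ t := List.mem_of_mem_filter hy
          by_cases hxy : x < y
          · exact hMmax _ (List.mem_filter.mpr ⟨hyt, by simp [hxy]⟩)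
          · omega
        have hMm : M ∈ t.filter (fun z => decide (m < z)) :=
          List.mem_filter.mpr ⟨hMt, by simp; omega⟩
        have hfne : t.filter (fun z => decide (m < z)) ≠ [] := by
          intro h; rw [h] at hMm; simp at hMm
        have hM2 : pvFmax (x :: t.filter (fun z => decide (m < z))) = M := by
          simp only [pvFmax]
          exact pvFoldlMax_eq_of _ _ _ hMm (le_of_lt hxM) hall
        rw [if_neg h2, hfil, if_neg (List.cons_ne_nil _ _), hM2]
        have hxneM : x ≠ M := by omega
        rw [List.idxOf_cons_ne _ (by simpa using hxneM)]
        push_cast; ring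
    · have hstep : pvStep (m, mi) (i0, x) = (m, mi) := by simp [pvStep]; omega
      rw [hstep, ih]
      have hfil : (x :: t).filter (fun y => decide (m < y)) =
          t.filter (fun y => decide (m < y)) := by simp [hx]
      rw [hfil]
      by_cases h2 : t.filter (fun y => decide (m < y)) = []
      · simp [h2]
      · set M := pvFmax (t.filter (fun z => decide (m < z))) with hMdef
        have hMmem := pvFmax_mem _ h2
        have hmM : m < M := by
          have := (List.mem_filter.mp hMmem).2; simpa using this
        have hxneM : x ≠ M := by omega
        rw [if_neg h2, if_neg h2, List.idxOf_cons_ne _ (by simpa using hxneM)]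
        push_cast; ring

theorem pvMaxind_eq (arr : List Int) :
    maxind arr =
      if (arr.filter (fun x => decide ((0:Int) < x))) = [] then -1
      else (List.idxOf (pvFmax (arr.filter (fun x => decide ((0:Int) < x)))) arr : Int) := by
  have h1 : maxind arr = (List.foldl pvStep ((0:Int), (-1:Int))
      (PySem.List.enumerate arr 0)).2 := by
    rw [maxind, PySem.List.enumerate_eq_map_pyRange arr 0, List.foldl_map]
    rfl
  rw [h1, pvKey]
  split <;> simp

-- ===== VERDICT (by name: the statement is the Claim_ definition above) =====
theorem maxind_spec : Claim_equal_maxind := by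
  intro arr _
  unfold Spec_maxind maxind_alt
  rw [pvMaxind_eq]
  by_cases hpos : arr.filter (fun x => decide ((0:Int) < x)) = []
  · simp [hpos]
  · rw [if_neg hpos]
    simp only [if_neg hpos]
    obtain ⟨p, ps, hcons⟩ := List.exists_cons_of_ne_nil hpos
    have hmax : PySem.List.max? (arr.filter (fun x => decide ((0:Int) < x))) (fun y => y) =
        some (pvFmax (arr.filter (fun x => decide ((0:Int) < x)))) := by
      rw [hcons, PySem.List.max?_id_cons]; rfl
    rw [hmax]
    have hmem : pvFmax (arr.filter (fun x => decide ((0:Int) < x))) ∈ arr :=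
      List.mem_of_mem_filter (pvFmax_mem _ hpos)
    have hidx : PySem.List.index? arr (pvFmax (arr.filter (fun x => decide ((0:Int) < x)))) =
        some (List.idxOf (pvFmax (arr.filter (fun x => decide ((0:Int) < x)))) arr) := by
      rw [PySem.List.index?_eq_idxOf?]
      exact pvIndex?_eq _ _ hmem
    simp only [hidx]
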